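-- pv_equiv track=rewrite | github.com/jcolinpatrick/kryptos | scripts/e_s_139_berlin_themed_cribs.py | check_periodicity
-- ===== SOURCE A (Python) =====
-- def check_periodicity(combined_keys, max_period=26):
--     """Find periods consistent with the combined keystream."""
--     positions = sorted(combined_keys.keys())
--     consistent = []
--     for p in range(2, max_period + 1):
--         ok = True
--         residue_vals = {}
--         for pos in positions:
--             r = pos % p
--             val = combined_keys[pos]
--             if r in residue_vals:
--                 if residue_vals[r] != val:
--                     ok = False
--                     break
--             else:
--                 residue_vals[r] = val
--         if ok:
--             consistent.append(p)
--     return consistent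
-- ===== SOURCE B (Python) =====
-- def check_periodicity(combined_keys, max_period=26):
--     """Find periods consistent with the combined keystream."""
--     items = list(combined_keys.items())
--     diffs = set()
--     for i in range(len(items)):
--         p1, v1 = items[i]
--         for p2, v2 in items[i + 1:]:
--             if v1 != v2:
--                 diffs.add(abs(p1 - p2))
--     return [p for p in range(2, max_period + 1)
--             if not any(d % p == 0 for d in diffs)]
-- ===== Notes on version B (the rewrite author's own statement) =====
-- stated objective: alternative
-- what changed: B precomputes the set of absolute position differences between pairs with differing keystream values and returns the periods dividing none of them, replacing A's per-period residue-grouping dictionary scan.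
import Mathlib
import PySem

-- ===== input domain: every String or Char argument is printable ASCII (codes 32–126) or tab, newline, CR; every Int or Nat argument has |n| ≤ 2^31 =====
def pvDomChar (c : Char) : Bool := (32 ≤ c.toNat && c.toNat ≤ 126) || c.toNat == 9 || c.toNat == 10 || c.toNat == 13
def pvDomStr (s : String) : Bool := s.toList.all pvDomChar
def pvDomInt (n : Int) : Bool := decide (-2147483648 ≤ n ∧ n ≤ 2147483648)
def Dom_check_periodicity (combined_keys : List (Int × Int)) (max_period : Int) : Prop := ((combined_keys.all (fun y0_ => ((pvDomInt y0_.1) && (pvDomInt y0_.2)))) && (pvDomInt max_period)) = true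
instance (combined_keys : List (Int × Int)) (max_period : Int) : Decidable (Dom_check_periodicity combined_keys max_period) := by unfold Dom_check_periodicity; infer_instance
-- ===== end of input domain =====

-- B replaces A's per-period residue-grouping scan by precomputing the set of position
-- differences between differing-value pairs and keeping the periods dividing none of them
-- (objective: alternative — a genuinely different algorithm, not claimed faster).

-- ===== PORT A =====
-- inner loop of A over the sorted positions: keep the first-seen value per residue class,
-- return false on the first mismatch (the Python 'break')
def cpScanA (d : PySem.Dict Int Int) (p : Int) : PySem.Dict Int Int → List Int → Bool
  | _, [] => true
  | rv, pos :: rest =>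
    let r := PySem.Int.mod pos p
    -- exact: every pos is drawn from d.keys, so d.get? pos is some; the default is never used
    let val := (d.get? pos).getD 0
    match rv.get? r with
    | some v => if v ≠ val then false else cpScanA d p rv rest
    | none => cpScanA d p (rv.insert r val) rest

def check_periodicity (combined_keys : List (Int × Int)) (max_period : Int) : List Int :=
  let d : PySem.Dict Int Int := PySem.Dict.mk combined_keys
  let positions := PySem.List.sorted d.keys (fun x => x) false
  (PySem.List.pyRange 2 (max_period + 1)).foldl
    (fun consistent p =>
      if cpScanA d p PySem.Dict.empty positions then consistent ++ [p] else consistent) []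

-- ===== PORT B =====
-- B's nested loop over later items: add |k1 - k2| for every pair with differing values
def cpDiffs : List (Int × Int) → PySem.Set Int → PySem.Set Int
  | [], s => s
  | (k1, v1) :: rest, s =>
    cpDiffs rest
      (rest.foldl (fun s kv => if v1 ≠ kv.2 then PySem.Set.add s |k1 - kv.1| else s) s)

def check_periodicity_alt (combined_keys : List (Int × Int)) (max_period : Int) : List Int :=
  let diffs := cpDiffs combined_keys PySem.Set.empty
  (PySem.List.pyRange 2 (max_period + 1)).filter
    (fun p => !(diffs.any (fun dd => PySem.Int.mod dd p == 0)))

-- ===== PRECONDITION & SPEC =====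
-- Pre_ excludes lists whose first components repeat: a Python dict cannot contain a
-- duplicate key, so such lists do not represent any input of the Python function.
def Pre_check_periodicity (combined_keys : List (Int × Int)) (max_period : Int) : Prop :=
  (combined_keys.map Prod.fst).Nodup
instance (combined_keys : List (Int × Int)) (max_period : Int) : Decidable (Pre_check_periodicity combined_keys max_period) := by unfold Pre_check_periodicity; infer_instance

def pvWitness_check_periodicity : (List (Int × Int)) × Int := ([(0, 2), (3, 2), (7, 1)], 6)

def Spec_check_periodicity (combined_keys : List (Int × Int)) (max_period : Int) (out : List Int) : Prop := out = check_periodicity_alt combined_keys max_period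
instance (combined_keys : List (Int × Int)) (max_period : Int) (out : List Int) : Decidable (Spec_check_periodicity combined_keys max_period out) := by unfold Spec_check_periodicity; infer_instance

-- ===== CLAIM (what is proved, stated in full; the proofs are below) =====
def Claim_equal_check_periodicity : Prop := ∀ (combined_keys : List (Int × Int)) (max_period : Int), Dom_check_periodicity combined_keys max_period → Pre_check_periodicity combined_keys max_period → Spec_check_periodicity combined_keys max_period (check_periodicity combined_keys max_period)

-- ===== LEMMAS AND PROOFS =====

-- abbreviation used only in the proofs: the value A looks up for a position
def cpVal (d : PySem.Dict Int Int) (x : Int) : Int := (d.get? x).getD 0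

-- consistency of a list of positions modulo p
def cpC (d : PySem.Dict Int Int) (p : Int) (l : List Int) : Prop :=
  ∀ a ∈ l, ∀ b ∈ l, PySem.Int.mod a p = PySem.Int.mod b p → cpVal d a = cpVal d b

-- characterisation of A's inner scan
theorem cpScanA_iff (d : PySem.Dict Int Int) (p : Int) (l : List Int) (rv : PySem.Dict Int Int) :
    cpScanA d p rv l = true ↔
      ((∀ a ∈ l, ∀ v, rv.get? (PySem.Int.mod a p) = some v → cpVal d a = v) ∧ cpC d p l) := by
  induction l generalizing rv with
  | nil => simp [cpScanA, cpC]
  | cons pos rest ih =>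
    simp only [cpScanA]
    rcases hrv : rv.get? (PySem.Int.mod pos p) with _ | v
    · -- none: insert branch
      rw [ih]
      constructor
      · rintro ⟨h1, h2⟩
        refine ⟨?_, ?_⟩
        · intro a ha v hv
          obtain hc | hc := List.mem_cons.mp ha
          · subst hc; rw [hrv] at hv; cases hv
          · by_cases hr : PySem.Int.mod a p = PySem.Int.mod pos p
            · rw [hr, hrv] at hv; cases hv
            · have := h1 a hc v
              rw [PySem.Dict.get?_insert] at this
              simp only [hr, if_false] at this
              exact this hv
        · intro a ha b hb hab
          obtain hca | hca := List.mem_cons.mp ha <;> obtain hcb | hcb := List.mem_cons.mp hb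
          · rw [hca, hcb]
          · have := h1 b hcb (cpVal d pos)
            rw [PySem.Dict.get?_insert] at this
            rw [hca] at hab
            simp only [hab, if_pos] at this
            rw [hca]
            exact (this rfl).symm
          · have := h1 a hca (cpVal d pos)
            rw [PySem.Dict.get?_insert] at this
            rw [hcb] at hab
            simp only [hab, if_pos] at this
            rw [hcb]
            exact this rfl
          · exact h2 a hca b hcb hab
      · rintro ⟨h1, h2⟩
        refine ⟨?_, ?_⟩
        · intro a ha v hv
          rw [PySem.Dict.get?_insert] at hv
          by_cases hr : PySem.Int.mod a p = PySem.Int.mod pos p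
          · rw [if_pos hr] at hv
            cases hv
            exact h2 a (List.mem_cons_of_mem _ ha) pos List.mem_cons_self hr
          · rw [if_neg hr] at hv
            exact h1 a (List.mem_cons_of_mem _ ha) v hv
        · intro a ha b hb hab
          exact h2 a (List.mem_cons_of_mem _ ha) b (List.mem_cons_of_mem _ hb) hab
    · -- some v
      change (if v ≠ (d.get? pos).getD 0 then false else cpScanA d p rv rest) = true ↔ _
      by_cases hv : v = (d.get? pos).getD 0
      · rw [if_neg (by simp [hv]), ih]
        constructor
        · rintro ⟨h1, h2⟩
          refine ⟨?_, ?_⟩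
          · intro a ha w hw
            obtain hc | hc := List.mem_cons.mp ha
            · subst hc; rw [hrv] at hw; cases hw; exact hv.symm
            · exact h1 a hc w hw
          · intro a ha b hb hab
            obtain hca | hca := List.mem_cons.mp ha <;> obtain hcb | hcb := List.mem_cons.mp hb
            · rw [hca, hcb]
            · rw [hca] at hab ⊢
              exact ((h1 b hcb v (by rw [← hab, hrv])).trans hv).symm
            · rw [hcb] at hab ⊢
              exact (h1 a hca v (by rw [hab, hrv])).trans hv
            · exact h2 a hca b hcb hab
        · rintro ⟨h1, h2⟩
          exact ⟨fun a ha w hw => h1 a (List.mem_cons_of_mem _ ha) w hw,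
                 fun a ha b hb hab => h2 a (List.mem_cons_of_mem _ ha) b (List.mem_cons_of_mem _ hb) hab⟩
      · rw [if_pos (by simpa using hv)]
        constructor
        · intro h; exact (Bool.false_ne_true h).elim
        · rintro ⟨h1, -⟩
          exact absurd (h1 pos List.mem_cons_self v hrv).symm hv

theorem cpInner_mem (k1 v1 : Int) (l : List (Int × Int)) (s : PySem.Set Int) (x : Int) :
    x ∈ l.foldl (fun s kv => if v1 ≠ kv.2 then PySem.Set.add s |k1 - kv.1| else s) s ↔
      x ∈ s ∨ ∃ kv ∈ l, v1 ≠ kv.2 ∧ x = |k1 - kv.1| := by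
  induction l generalizing s with
  | nil => simp
  | cons kv rest ih =>
    simp only [List.foldl_cons, ih]
    by_cases h : v1 = kv.2
    · simp [h]
    · rw [if_pos h, PySem.Set.mem_add]
      constructor
      · rintro ((hs | hx) | ⟨kv', h1, h2, h3⟩)
        · exact Or.inl hs
        · exact Or.inr ⟨kv, List.mem_cons_self, h, hx⟩
        · exact Or.inr ⟨kv', List.mem_cons_of_mem _ h1, h2, h3⟩
      · rintro (hs | ⟨kv', hmem, h2, h3⟩)
        · exact Or.inl (Or.inl hs)
        · rcases List.mem_cons.mp hmem with rfl | h1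
          · exact Or.inl (Or.inr h3)
          · exact Or.inr ⟨kv', h1, h2, h3⟩

theorem cpDiffs_mem (l : List (Int × Int)) (s : PySem.Set Int) (x : Int) :
    x ∈ cpDiffs l s ↔
      x ∈ s ∨ ∃ a b : Int × Int, [a, b].Sublist l ∧ a.2 ≠ b.2 ∧ x = |a.1 - b.1| := by
  induction l generalizing s with
  | nil => simp [cpDiffs]
  | cons hd rest ih =>
    obtain ⟨k1, v1⟩ := hd
    rw [cpDiffs, ih, cpInner_mem]
    have hsub : ∀ a b : Int × Int, [a, b].Sublist ((k1, v1) :: rest) ↔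
        [a, b].Sublist rest ∨ (a = (k1, v1) ∧ b ∈ rest) := by
      intro a b
      rw [List.sublist_cons_iff]
      constructor
      · rintro (h | ⟨r, hr, hsub⟩)
        · exact Or.inl h
        · cases hr
          exact Or.inr ⟨rfl, List.singleton_sublist.mp hsub⟩
      · rintro (h | ⟨rfl, hb⟩)
        · exact Or.inl h
        · exact Or.inr ⟨[b], rfl, List.singleton_sublist.mpr hb⟩
    constructor
    · rintro ((hs | ⟨kv, hkv, hne, hx⟩) | ⟨a, b, hab, hne, hx⟩)
      · exact Or.inl hs
      · exact Or.inr ⟨(k1, v1), kv, (hsub _ _).mpr (Or.inr ⟨rfl, hkv⟩), hne, hx⟩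
      · exact Or.inr ⟨a, b, (hsub _ _).mpr (Or.inl hab), hne, hx⟩
    · rintro (hs | ⟨a, b, hab, hne, hx⟩)
      · exact Or.inl (Or.inl hs)
      · rcases (hsub _ _).mp hab with h | ⟨rfl, hb⟩
        · exact Or.inr ⟨a, b, h, hne, hx⟩
        · exact Or.inl (Or.inr ⟨b, hb, hne, hx⟩)

theorem cpPair_sublist {α : Type} {a b : α} {l : List α} (ha : a ∈ l) (hb : b ∈ l)
    (hne : a ≠ b) : [a, b].Sublist l ∨ [b, a].Sublist l := by
  induction l with
  | nil => cases ha
  | cons h t ih =>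
    obtain hca | hca := List.mem_cons.mp ha
    · subst hca
      have hbt : b ∈ t := by
        rcases List.mem_cons.mp hb with h | h
        · exact absurd h.symm hne
        · exact h
      exact Or.inl (List.cons_sublist_cons.mpr (List.singleton_sublist.mpr hbt))
    · obtain hcb | hcb := List.mem_cons.mp hb
      · subst hcb
        exact Or.inr (List.cons_sublist_cons.mpr (List.singleton_sublist.mpr hca))
      · rcases ih hca hcb with h | h
        · exact Or.inl (h.cons _)
        · exact Or.inr (h.cons _)

theorem cpMod_eq_iff (a b p : Int) (hp : 0 < p) :
    PySem.Int.mod a p = PySem.Int.mod b p ↔ p ∣ (a - b) := by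
  rw [PySem.Int.mod_eq_emod_of_pos hp, PySem.Int.mod_eq_emod_of_pos hp,
    Int.emod_eq_emod_iff_emod_sub_eq_zero]
  constructor
  · exact Int.dvd_of_emod_eq_zero
  · exact Int.emod_eq_zero_of_dvd

-- the heart: for 2 ≤ p, A's scan and B's divisibility test agree
theorem cpCond_eq (combined_keys : List (Int × Int)) (p : Int) (hp : 2 ≤ p)
    (hnd : (combined_keys.map Prod.fst).Nodup) :
    cpScanA (PySem.Dict.mk combined_keys) p PySem.Dict.empty
        (PySem.List.sorted (PySem.Dict.mk combined_keys).keys (fun x => x) false) =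
      !((cpDiffs combined_keys PySem.Set.empty).any (fun dd => PySem.Int.mod dd p == 0)) := by
  have hp0 : (0 : Int) < p := by omega
  set d := PySem.Dict.mk combined_keys with hd
  set positions := PySem.List.sorted d.keys (fun x => x) false with hpos
  have hkeysnd : d.keys.Nodup := by
    rw [hd, PySem.Dict.keys_mk]; exact hnd
  have hval : ∀ kv ∈ combined_keys, cpVal d kv.1 = kv.2 := by
    intro kv hkv
    have : d.get? kv.1 = some kv.2 :=
      PySem.Dict.get?_of_mem_items d (by exact hkv) hkeysnd
    simp [cpVal, this]
  have hmem : ∀ y, y ∈ positions ↔ ∃ kv ∈ combined_keys, kv.1 = y := by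
    intro y
    rw [hpos, PySem.List.mem_sorted, hd, PySem.Dict.keys_mk]
    simp [List.mem_map]
  rw [Bool.eq_iff_iff]
  rw [cpScanA_iff]
  have hempty : ∀ a ∈ positions, ∀ v, PySem.Dict.empty.get? (PySem.Int.mod a p) = some v →
      cpVal d a = v := by
    intro a _ v hv
    rw [PySem.Dict.get?_empty] at hv; cases hv
  simp only [Bool.not_eq_true', Bool.eq_false_iff, ne_eq, List.any_eq_true]
  constructor
  · rintro ⟨-, hC⟩ ⟨dd, hdd, hdvd⟩
    rw [cpDiffs_mem] at hdd
    rcases hdd with hdd | ⟨a, b, hsub, hne, rfl⟩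
    · cases hdd
    · have hdvd' : p ∣ (a.1 - b.1) := by
        rw [beq_iff_eq, PySem.Int.mod_eq_zero_iff_dvd] at hdvd
        exact (dvd_abs p _).mp hdvd
      have hsubs := hsub.subset
      have ha : a ∈ combined_keys := hsubs (by simp)
      have hb : b ∈ combined_keys := hsubs (by simp)
      have hmod : PySem.Int.mod a.1 p = PySem.Int.mod b.1 p :=
        (cpMod_eq_iff _ _ _ hp0).mpr hdvd'
      have := hC a.1 ((hmem a.1).mpr ⟨a, ha, rfl⟩) b.1 ((hmem b.1).mpr ⟨b, hb, rfl⟩) hmod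
      rw [hval a ha, hval b hb] at this
      exact hne this
  · intro hN
    refine ⟨hempty, ?_⟩
    intro x hx y hy hmod
    obtain ⟨kvx, hkvx, rfl⟩ := (hmem x).mp hx
    obtain ⟨kvy, hkvy, rfl⟩ := (hmem y).mp hy
    by_contra hne'
    rw [hval kvx hkvx, hval kvy hkvy] at hne'
    have hpair : kvx ≠ kvy := fun h => hne' (by rw [h])
    have hdvd : p ∣ (kvx.1 - kvy.1) := (cpMod_eq_iff _ _ _ hp0).mp hmod
    rcases cpPair_sublist hkvx hkvy hpair with h | h
    · exact hN ⟨|kvx.1 - kvy.1|,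
        (cpDiffs_mem _ _ _).mpr (Or.inr ⟨kvx, kvy, h, hne', rfl⟩),
        by rw [beq_iff_eq, PySem.Int.mod_eq_zero_iff_dvd]; exact (dvd_abs p _).mpr hdvd⟩
    · exact hN ⟨|kvy.1 - kvx.1|,
        (cpDiffs_mem _ _ _).mpr (Or.inr ⟨kvy, kvx, h, fun hh => hne' hh.symm, rfl⟩),
        by rw [beq_iff_eq, PySem.Int.mod_eq_zero_iff_dvd]
           exact (dvd_abs p _).mpr (dvd_sub_comm.mp hdvd)⟩

theorem check_periodicity_spec : Claim_equal_check_periodicity := by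
  intro ck mp _hDom hPre
  unfold Spec_check_periodicity check_periodicity check_periodicity_alt
  rw [PySem.List.foldl_append_if
    (fun p => cpScanA (PySem.Dict.mk ck) p PySem.Dict.empty
      (PySem.List.sorted (PySem.Dict.mk ck).keys (fun x => x) false)) (fun p => p)]
  simp only [List.nil_append, List.map_id']
  apply List.filter_congr
  intro p hpmem
  have hp : 2 ≤ p := (PySem.List.mem_pyRange_one.mp hpmem).1
  exact cpCond_eq ck p hp hPre
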